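-- pv_equiv track=rewrite | github.com/ppipil/potato-novel | backend/app/domain/story_package.py | choice_effects
-- ===== SOURCE A (Python) =====
-- def choice_effects(style: str) -> dict[str, dict[str, int]]:
--     """根据选项风格生成默认的人格与关系数值影响。"""
--     persona_effect = {
--         "extrovert_introvert": 0,
--         "scheming_naive": 0,
--         "optimistic_pessimistic": 0,
--     }
--     relationship_effect = {"favor": 0}
--
--     if style in {"soft", "support", "trust"}:
--         persona_effect["extrovert_introvert"] += 1
--         persona_effect["optimistic_pessimistic"] += 1
--         relationship_effect["favor"] += 1
--     elif style == "tease":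
--         persona_effect["extrovert_introvert"] += 1
--         relationship_effect["favor"] += 1
--     elif style == "confrontation":
--         persona_effect["extrovert_introvert"] += 1
--         persona_effect["optimistic_pessimistic"] -= 1
--         relationship_effect["favor"] -= 1
--     elif style in {"strategy", "manipulation"}:
--         persona_effect["scheming_naive"] += 1
--         relationship_effect["favor"] -= 1
--     elif style == "observation":
--         persona_effect["extrovert_introvert"] -= 1
--         persona_effect["scheming_naive"] += 1
--     elif style == "risk":
--         persona_effect["extrovert_introvert"] += 1
--         persona_effect["optimistic_pessimistic"] -= 1
--
--     return {
--         "persona": {key: value for key, value in persona_effect.items() if value},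
--         "relationship": {key: value for key, value in relationship_effect.items() if value},
--     }
-- ===== SOURCE B (Python) =====
-- _EFFECT_TABLE = {
--     "soft": {"persona": {"extrovert_introvert": 1, "optimistic_pessimistic": 1}, "relationship": {"favor": 1}},
--     "support": {"persona": {"extrovert_introvert": 1, "optimistic_pessimistic": 1}, "relationship": {"favor": 1}},
--     "trust": {"persona": {"extrovert_introvert": 1, "optimistic_pessimistic": 1}, "relationship": {"favor": 1}},
--     "tease": {"persona": {"extrovert_introvert": 1}, "relationship": {"favor": 1}},
--     "confrontation": {"persona": {"extrovert_introvert": 1, "optimistic_pessimistic": -1}, "relationship": {"favor": -1}},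
--     "strategy": {"persona": {"scheming_naive": 1}, "relationship": {"favor": -1}},
--     "manipulation": {"persona": {"scheming_naive": 1}, "relationship": {"favor": -1}},
--     "observation": {"persona": {"extrovert_introvert": -1, "scheming_naive": 1}, "relationship": {}},
--     "risk": {"persona": {"extrovert_introvert": 1, "optimistic_pessimistic": -1}, "relationship": {}},
-- }
--
-- def choice_effects(style: str) -> dict[str, dict[str, int]]:
--     entry = _EFFECT_TABLE.get(style, {"persona": {}, "relationship": {}})
--     return {"persona": dict(entry["persona"]), "relationship": dict(entry["relationship"])}
-- ===== Notes on version B (the rewrite author's own statement) =====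
-- stated objective: simpler
-- what changed: Replaces branch-wise dict mutation plus a zero-filtering comprehension with a single precomputed lookup table mapping each style directly to its final filtered result, defaulting to empty effects for unknown styles.
import Mathlib
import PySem

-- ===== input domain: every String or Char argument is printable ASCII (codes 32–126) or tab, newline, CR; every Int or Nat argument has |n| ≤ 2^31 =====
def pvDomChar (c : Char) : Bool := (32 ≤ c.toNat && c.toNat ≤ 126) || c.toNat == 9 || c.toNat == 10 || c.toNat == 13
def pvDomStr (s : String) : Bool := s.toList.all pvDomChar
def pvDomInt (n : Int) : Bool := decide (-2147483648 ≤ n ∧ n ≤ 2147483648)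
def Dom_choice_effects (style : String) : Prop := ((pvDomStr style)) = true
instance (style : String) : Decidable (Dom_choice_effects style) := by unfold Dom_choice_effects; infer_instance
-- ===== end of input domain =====

-- B replaces A's branch-wise arithmetic and zero-filtering with a single precomputed
-- lookup table from style to the final filtered effect dicts (objective: simpler).

-- ===== PORT A =====
-- literal transliteration: mutate the two dicts branch by branch, then filter zeros
def choice_effects (style : String) : List (String × List (String × Int)) :=
  let persona0 : PySem.Dict String Int :=
    PySem.Dict.ofList [("extrovert_introvert", 0), ("scheming_naive", 0), ("optimistic_pessimistic", 0)]
  let rel0 : PySem.Dict String Int := PySem.Dict.ofList [("favor", 0)]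
  let st :=
    if style == "soft" || style == "support" || style == "trust" then
      ((persona0.modify "extrovert_introvert" 0 (· + 1)).modify "optimistic_pessimistic" 0 (· + 1),
       rel0.modify "favor" 0 (· + 1))
    else if style == "tease" then
      (persona0.modify "extrovert_introvert" 0 (· + 1), rel0.modify "favor" 0 (· + 1))
    else if style == "confrontation" then
      ((persona0.modify "extrovert_introvert" 0 (· + 1)).modify "optimistic_pessimistic" 0 (· - 1),
       rel0.modify "favor" 0 (· - 1))
    else if style == "strategy" || style == "manipulation" then
      (persona0.modify "scheming_naive" 0 (· + 1), rel0.modify "favor" 0 (· - 1))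
    else if style == "observation" then
      ((persona0.modify "extrovert_introvert" 0 (· - 1)).modify "scheming_naive" 0 (· + 1), rel0)
    else if style == "risk" then
      ((persona0.modify "extrovert_introvert" 0 (· + 1)).modify "optimistic_pessimistic" 0 (· - 1), rel0)
    else (persona0, rel0)
  [("persona", st.1.items.filter (fun kv => kv.2 ≠ 0)),
   ("relationship", st.2.items.filter (fun kv => kv.2 ≠ 0))]

-- ===== PORT B =====
-- dict[str, result] → association list (type convention); .get(style, default) = first match or default
def choice_effects_table : List (String × List (String × List (String × Int))) :=
    [ ("soft", [("persona", [("extrovert_introvert", 1), ("optimistic_pessimistic", 1)]), ("relationship", [("favor", 1)])])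
    , ("support", [("persona", [("extrovert_introvert", 1), ("optimistic_pessimistic", 1)]), ("relationship", [("favor", 1)])])
    , ("trust", [("persona", [("extrovert_introvert", 1), ("optimistic_pessimistic", 1)]), ("relationship", [("favor", 1)])])
    , ("tease", [("persona", [("extrovert_introvert", 1)]), ("relationship", [("favor", 1)])])
    , ("confrontation", [("persona", [("extrovert_introvert", 1), ("optimistic_pessimistic", -1)]), ("relationship", [("favor", -1)])])
    , ("strategy", [("persona", [("scheming_naive", 1)]), ("relationship", [("favor", -1)])])
    , ("manipulation", [("persona", [("scheming_naive", 1)]), ("relationship", [("favor", -1)])])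
    , ("observation", [("persona", [("extrovert_introvert", -1), ("scheming_naive", 1)]), ("relationship", [])])
    , ("risk", [("persona", [("extrovert_introvert", 1), ("optimistic_pessimistic", -1)]), ("relationship", [])])
    ]

def choice_effects_alt (style : String) : List (String × List (String × Int)) :=
  ((choice_effects_table.find? (fun p => p.1 == style)).map (·.2)).getD
    [("persona", []), ("relationship", [])]

-- ===== PRECONDITION & SPEC =====
def Spec_choice_effects (style : String) (out : List (String × List (String × Int))) : Prop := out = choice_effects_alt style
instance (style : String) (out : List (String × List (String × Int))) : Decidable (Spec_choice_effects style out) := by unfold Spec_choice_effects; infer_instance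

-- ===== CLAIM (what is proved, stated in full; the proofs are below) =====
def Claim_equal_choice_effects : Prop := ∀ (style : String), Dom_choice_effects style → Spec_choice_effects style (choice_effects style)

-- ===== LEMMAS AND PROOFS =====

-- ===== VERDICT (by name: the statement is the Claim_ definition above) =====
set_option maxHeartbeats 2000000 in
theorem choice_effects_spec : Claim_equal_choice_effects := by
  intro style _
  unfold Spec_choice_effects
  by_cases h1 : style = "soft"; · subst h1; decide
  by_cases h2 : style = "support"; · subst h2; decide
  by_cases h3 : style = "trust"; · subst h3; decide
  by_cases h4 : style = "tease"; · subst h4; decide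
  by_cases h5 : style = "confrontation"; · subst h5; decide
  by_cases h6 : style = "strategy"; · subst h6; decide
  by_cases h7 : style = "manipulation"; · subst h7; decide
  by_cases h8 : style = "observation"; · subst h8; decide
  by_cases h9 : style = "risk"; · subst h9; decide
  have b1 : (style == "soft") = false := beq_eq_false_iff_ne.mpr h1
  have c1 : ("soft" == style) = false := beq_eq_false_iff_ne.mpr (Ne.symm h1)
  have b2 : (style == "support") = false := beq_eq_false_iff_ne.mpr h2
  have c2 : ("support" == style) = false := beq_eq_false_iff_ne.mpr (Ne.symm h2)
  have b3 : (style == "trust") = false := beq_eq_false_iff_ne.mpr h3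
  have c3 : ("trust" == style) = false := beq_eq_false_iff_ne.mpr (Ne.symm h3)
  have b4 : (style == "tease") = false := beq_eq_false_iff_ne.mpr h4
  have c4 : ("tease" == style) = false := beq_eq_false_iff_ne.mpr (Ne.symm h4)
  have b5 : (style == "confrontation") = false := beq_eq_false_iff_ne.mpr h5
  have c5 : ("confrontation" == style) = false := beq_eq_false_iff_ne.mpr (Ne.symm h5)
  have b6 : (style == "strategy") = false := beq_eq_false_iff_ne.mpr h6
  have c6 : ("strategy" == style) = false := beq_eq_false_iff_ne.mpr (Ne.symm h6)
  have b7 : (style == "manipulation") = false := beq_eq_false_iff_ne.mpr h7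
  have c7 : ("manipulation" == style) = false := beq_eq_false_iff_ne.mpr (Ne.symm h7)
  have b8 : (style == "observation") = false := beq_eq_false_iff_ne.mpr h8
  have c8 : ("observation" == style) = false := beq_eq_false_iff_ne.mpr (Ne.symm h8)
  have b9 : (style == "risk") = false := beq_eq_false_iff_ne.mpr h9
  have c9 : ("risk" == style) = false := beq_eq_false_iff_ne.mpr (Ne.symm h9)
  simp only [choice_effects, choice_effects_alt, choice_effects_table, List.find?,
        b1, b2, b3, b4, b5, b6, b7, b8, b9, c1, c2, c3, c4, c5, c6, c7, c8, c9,
        Bool.or_false, Bool.false_eq_true, if_false,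
        Option.map_none, Option.getD_none]
  decide
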